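-- pv_equiv track=rewrite | github.com/Aviciiiiii/FOT-Ontology | fot/ontology/static/semantic_parent_linker.py | prepare_level_dictionary
-- ===== SOURCE A (Python) =====
-- from typing import List, Dict, Any, Tuple, Optional
--
-- def _ipc_prefix(ipc: str) -> str:
--     return (ipc or "").strip()[:3]
--
-- def prepare_level_dictionary(second_level_entities: List[Dict[str, Any]]) -> Dict[str, List[Dict[str, Any]]]:
--     """Group Level 2 entities by IPC prefix (original script format)."""
--     ipc_map = {}
--     for entity in second_level_entities:
--         key = _ipc_prefix(entity.get('ent_ipc', ''))
--         if key not in ipc_map: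
--             ipc_map[key] = []
--         ipc_map[key].append(entity)
--     return ipc_map
-- ===== SOURCE B (Python) =====
-- from typing import List, Dict, Any
--
-- def _key(entity):
--     return (entity.get('ent_ipc', '') or "").strip()[:3]
--
-- def prepare_level_dictionary(second_level_entities):
--     """Group Level 2 entities by IPC prefix (original script format)."""
--     keys = [_key(e) for e in second_level_entities]
--     order = list(dict.fromkeys(keys))
--     return {k: [e for e, ek in zip(second_level_entities, keys) if ek == k]
--             for k in order}
-- ===== Notes on version B (the rewrite author's own statement) =====
-- stated objective: alternative
-- what changed: Replaces the one-pass dict-accumulation with a two-phase grouping: compute all keys once, dedup them in first-occurrence order with dict.fromkeys, then build each group by a filter over the zipped (entity, key) list via a dict comprehension.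
import Mathlib
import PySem

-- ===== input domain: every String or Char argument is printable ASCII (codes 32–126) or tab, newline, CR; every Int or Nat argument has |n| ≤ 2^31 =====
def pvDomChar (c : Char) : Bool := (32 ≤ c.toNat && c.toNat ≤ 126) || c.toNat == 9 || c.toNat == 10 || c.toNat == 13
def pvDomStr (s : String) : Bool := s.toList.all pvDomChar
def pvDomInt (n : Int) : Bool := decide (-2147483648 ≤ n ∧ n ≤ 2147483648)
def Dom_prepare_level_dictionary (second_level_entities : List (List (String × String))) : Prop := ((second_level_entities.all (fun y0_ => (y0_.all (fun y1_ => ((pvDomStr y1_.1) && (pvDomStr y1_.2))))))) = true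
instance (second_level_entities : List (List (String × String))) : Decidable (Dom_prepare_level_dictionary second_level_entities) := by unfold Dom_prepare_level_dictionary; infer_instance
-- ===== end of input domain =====

-- B groups in two phases (all keys, dedup in first-occurrence order, filter per key) instead of A's one-pass dict accumulation; same result, alternative structure.


-- ===== PORT A =====
def pvIpcPrefixA (ipc : String) : String :=
  PySem.Str.slice (PySem.Str.strip (if ipc = "" then "" else ipc)) none (some 3)

def prepare_level_dictionary (second_level_entities : List (List (String × String))) : List (String × List (List (String × String))) :=
  (second_level_entities.foldl
    (fun ipc_map entity =>
      let key := pvIpcPrefixA (PySem.Dict.getD (PySem.Dict.mk entity) "ent_ipc" "")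
      let ipc_map := if (PySem.Dict.contains ipc_map key) = false then PySem.Dict.insert ipc_map key [] else ipc_map
      PySem.Dict.modify ipc_map key [] (fun l => l ++ [entity]))
    PySem.Dict.empty).items

-- ===== PORT B =====
def pvKeyB (entity : List (String × String)) : String :=
  PySem.Str.slice (PySem.Str.strip (if PySem.Dict.getD (PySem.Dict.mk entity) "ent_ipc" "" = "" then "" else PySem.Dict.getD (PySem.Dict.mk entity) "ent_ipc" "")) none (some 3)

def prepare_level_dictionary_alt (second_level_entities : List (List (String × String))) : List (String × List (List (String × String))) :=
  let keys := second_level_entities.map pvKeyB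
  let order := PySem.List.dedup keys
  order.map (fun k => (k, ((second_level_entities.zip keys).filter (fun p => p.2 == k)).map (fun p => p.1)))

-- ===== PRECONDITION & SPEC =====
def Spec_prepare_level_dictionary (second_level_entities : List (List (String × String))) (out : List (String × List (List (String × String)))) : Prop := out = prepare_level_dictionary_alt second_level_entities
instance (second_level_entities : List (List (String × String))) (out : List (String × List (List (String × String)))) : Decidable (Spec_prepare_level_dictionary second_level_entities out) := by unfold Spec_prepare_level_dictionary; infer_instance

-- ===== CLAIM (what is proved, stated in full; the proofs are below) =====
def Claim_equal_prepare_level_dictionary : Prop := ∀ (second_level_entities : List (List (String × String))), Dom_prepare_level_dictionary second_level_entities → Spec_prepare_level_dictionary second_level_entities (prepare_level_dictionary second_level_entities)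

-- ===== LEMMAS AND PROOFS =====

-- One step of A's loop equals a single `modify` (absent key: insert [] then modify = modify with default []).
theorem pvStep_eq_modify (d : PySem.Dict String (List (List (String × String)))) (k : String)
    (e : List (String × String)) :
    (if (PySem.Dict.contains d k) = false then PySem.Dict.insert d k [] else d).modify k []
        (fun l => l ++ [e]) =
      d.modify k [] (fun l => l ++ [e]) := by
  by_cases h : PySem.Dict.contains d k = false
  · rw [if_pos h]
    simp only [PySem.Dict.modify]
    rw [PySem.Dict.getD_insert_self, PySem.Dict.insert_insert_self,
        PySem.Dict.getD_of_not_contains d [] h]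
  · rw [if_neg h]

-- A's result as dedup-of-keys with per-key filters (the closed form B computes).
theorem pvA_closed (es : List (List (String × String))) :
    prepare_level_dictionary es =
      (PySem.List.dedup (es.map pvKeyB)).map
        (fun k => (k, es.filter (fun e => pvKeyB e == k))) := by
  unfold prepare_level_dictionary
  have h1 : (fun (d : PySem.Dict String (List (List (String × String)))) (e : List (String × String)) =>
      let key := pvIpcPrefixA (PySem.Dict.getD (PySem.Dict.mk e) "ent_ipc" "")
      let d' := if (PySem.Dict.contains d key) = false then PySem.Dict.insert d key [] else d
      d'.modify key [] (fun l => l ++ [e]))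
      = fun d e => d.modify (pvKeyB e) [] (fun l => l ++ [e]) := by
    funext d e
    exact pvStep_eq_modify d _ e
  rw [h1]
  have hfold : es.foldl (fun d e => d.modify (pvKeyB e) [] (fun l => l ++ [e])) PySem.Dict.empty
      = (es.map (fun e => (pvKeyB e, e))).foldl
          (fun d p => d.modify p.1 [] (fun l => l ++ [p.2])) PySem.Dict.empty := by
    rw [List.foldl_map]
  rw [hfold]
  rw [PySem.Dict.items_eq_map_keys _
    (PySem.Dict.nodup_keys_foldl_modify_key _ Prod.fst [] (fun _ p => fun l => l ++ [p.2]) _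
      (by simp)) []]
  rw [PySem.Dict.keys_foldl_modify_key _ Prod.fst [] (fun _ p => fun l => l ++ [p.2])]
  congr 1
  · funext k
    rw [PySem.Dict.getD_foldl_modify_append]
    simp [List.filter_map, Function.comp_def]
  · simp only [PySem.Dict.keys_empty, List.map_map, Function.comp_def]
    rw [PySem.List.dedup_eq_ofList, PySem.Set.ofList_eq_foldl]
    rfl

-- ===== VERDICT (by name: the statement is the Claim_ definition above) =====
theorem prepare_level_dictionary_spec : Claim_equal_prepare_level_dictionary := by
  intro es _
  unfold Spec_prepare_level_dictionary prepare_level_dictionary_alt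
  rw [pvA_closed]
  have hz : es.zip (es.map pvKeyB) = es.map (fun e => (e, pvKeyB e)) := by
    simpa using List.zip_map' (f := id) (g := pvKeyB) (l := es)
  simp [hz, List.filter_map, Function.comp_def]
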